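-- pv_equiv track=rewrite | github.com/victordsrocha/academy-aula02 | src/gen_functions.py | questao06
-- ===== SOURCE A (Python) =====
-- def questao06(string_list, analyzed_string, threshold):
--     """
--
--     Args:
--         string_list:
--         analyzed_string:
--         threshold:
--
--     Returns:
--
--     """
--     analyzed_string_indexes = []
--     for i in range(len(string_list)):
--         if string_list[i] == analyzed_string:
--             analyzed_string_indexes.append(i)
--
--     threshold_indexes = set()
--     for i in range(1, threshold + 1):
--         for p in analyzed_string_indexes:
--             new_threshold_index = p - i
--             if new_threshold_index < 0:
--                 new_threshold_index = 0
--             threshold_indexes.add(new_threshold_index)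
--             new_threshold_index = p + i
--             if new_threshold_index > (len(string_list) - 1):
--                 new_threshold_index = (len(string_list) - 1)
--             threshold_indexes.add(new_threshold_index)
--
--     threshold_indexes = list(threshold_indexes)
--     threshold_indexes.sort()
--
--     result_list = []
--     for p in threshold_indexes:
--         if string_list[p] not in result_list:
--             result_list.append(string_list[p])
--
--     return result_list
-- ===== SOURCE B (Python) =====
-- def questao06(string_list, analyzed_string, threshold):
--     matches = [i for i, s in enumerate(string_list) if s == analyzed_string]
--     result = []
--     for j, s in enumerate(string_list):
--         if any(q != j and abs(q - j) <= threshold for q in matches) and s not in result: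
--             result.append(s)
--     return result
-- ===== Notes on version B (the rewrite author's own statement) =====
-- stated objective: alternative
-- what changed: Replaces A's offset-enumeration (loop i=1..threshold over all match indices filling a set of clamped indices, then list+sort+dedup) with a single ordered pass over the indices that admits an index iff some other occurrence lies within threshold of it, so the threshold-sized loop, the clamping and the set/sort machinery disappear.
-- intended difference: When the first or last element equals analyzed_string and no other occurrence lies within threshold of it (threshold>=1), A's clamping of out-of-range offsets onto the array boundary makes A report that occurrence itself as its own neighbour (e.g. A returns ['a','b'] on (['a','b'],'a',1)), while B returns only strings at distance 1..threshold from an occurrence (['b']), which is the intended reading shown by A's own loop starting at offset 1. — e.g. on questao06(["a", "b"], "a", 1): A returns ["a", "b"], B returns ["b"]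
import Mathlib
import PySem

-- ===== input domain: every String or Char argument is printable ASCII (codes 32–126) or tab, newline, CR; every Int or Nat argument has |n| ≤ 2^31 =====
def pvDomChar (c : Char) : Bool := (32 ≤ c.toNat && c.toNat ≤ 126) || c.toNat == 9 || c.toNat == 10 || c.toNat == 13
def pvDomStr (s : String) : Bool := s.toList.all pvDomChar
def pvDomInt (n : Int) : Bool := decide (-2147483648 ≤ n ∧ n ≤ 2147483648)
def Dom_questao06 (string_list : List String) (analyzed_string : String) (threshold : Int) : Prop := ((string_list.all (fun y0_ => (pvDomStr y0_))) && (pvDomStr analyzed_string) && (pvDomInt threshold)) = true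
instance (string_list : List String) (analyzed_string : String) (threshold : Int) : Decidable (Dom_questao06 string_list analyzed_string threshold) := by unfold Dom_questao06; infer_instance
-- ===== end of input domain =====

-- B scans the indices once in order, admitting an index iff some OTHER occurrence of the
-- analyzed string lies within threshold of it (objective: alternative); outside D_ below it
-- returns exactly A's value.

-- ===== PORT A =====
-- the first loop: indices i with string_list[i] == analyzed_string, in order
def qaIdxs (string_list : List String) (analyzed_string : String) : List Int :=
  (PySem.List.pyRange 0 (string_list.length : Int) 1).foldl
    (fun acc i => if PySem.List.pyGetD string_list i "" == analyzed_string then acc ++ [i] else acc) []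

-- 'new_threshold_index = p - i; if < 0: 0'
def qaClampLo (p i : Int) : Int := if p - i < 0 then 0 else p - i
-- 'new_threshold_index = p + i; if > len-1: len-1'
def qaClampHi (n p i : Int) : Int := if p + i > n - 1 then n - 1 else p + i

-- the nested loop filling threshold_indexes (a Python set)
def qaSet (string_list : List String) (analyzed_string : String) (threshold : Int) : PySem.Set Int :=
  (PySem.List.pyRange 1 (threshold + 1) 1).foldl
    (fun st i => (qaIdxs string_list analyzed_string).foldl
      (fun st p => PySem.Set.add (PySem.Set.add st (qaClampLo p i))
                                 (qaClampHi (string_list.length : Int) p i)) st)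
    PySem.Set.empty

def questao06 (string_list : List String) (analyzed_string : String) (threshold : Int) : List String :=
  (PySem.List.sorted (qaSet string_list analyzed_string threshold) (fun x => x)).foldl
    (fun res p =>
      let s := PySem.List.pyGetD string_list p ""
      if s ∈ res then res else res ++ [s]) []

-- ===== PORT B =====
-- matches = [i for i, s in enumerate(string_list) if s == analyzed_string]
def qbMatches (string_list : List String) (analyzed_string : String) : List Int :=
  ((PySem.List.enumerate string_list).filter (fun pr => pr.2 == analyzed_string)).map (fun pr => pr.1)

-- any(q != j and abs(q - j) <= threshold for q in matches)
def qbNear (threshold : Int) (ms : List Int) (j : Int) : Bool :=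
  ms.any (fun q => (q != j) && decide (|q - j| ≤ threshold))

def questao06_alt (string_list : List String) (analyzed_string : String) (threshold : Int) : List String :=
  (PySem.List.enumerate string_list).foldl
    (fun res pr =>
      if qbNear threshold (qbMatches string_list analyzed_string) pr.1 = true ∧ pr.2 ∉ res
      then res ++ [pr.2] else res) []

-- ===== PRECONDITION & SPEC =====
-- When the first or last element equals analyzed_string and no other occurrence lies within
-- threshold of it (threshold ≥ 1), A's clamping of out-of-range offsets onto the boundary makes A
-- report that occurrence itself as its own neighbour; B returns only strings at distance
-- 1..threshold from an occurrence, the intended reading shown by A's own loop starting at offset 1.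
def D_questao06 (string_list : List String) (analyzed_string : String) (threshold : Int) : Prop :=
  1 ≤ threshold ∧
  ((0 ∈ string_list.idxsOf analyzed_string ∧
      ∀ k ∈ string_list.idxsOf analyzed_string, k ≤ threshold.toNat → k = 0) ∨
   (string_list.length - 1 ∈ string_list.idxsOf analyzed_string ∧
      (string_list.idxsOf analyzed_string).IsChain fun p q => threshold.toNat < q - p))
instance (string_list : List String) (analyzed_string : String) (threshold : Int) : Decidable (D_questao06 string_list analyzed_string threshold) := by unfold D_questao06; infer_instance

def Spec_questao06 (string_list : List String) (analyzed_string : String) (threshold : Int) (out : List String) : Prop := ¬ D_questao06 string_list analyzed_string threshold → out = questao06_alt string_list analyzed_string threshold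
instance (string_list : List String) (analyzed_string : String) (threshold : Int) (out : List String) : Decidable (Spec_questao06 string_list analyzed_string threshold out) := by unfold Spec_questao06; infer_instance

def pvDiffWitness_questao06 : List String × String × Int := (["a", "b"], "a", 1)
def pvDiffWitnessOut_questao06 : (List String) × (List String) := (["a", "b"], ["b"])

-- ===== CLAIM (what is proved, stated in full; the proofs are below) =====
def Claim_unchanged_questao06 : Prop := ∀ (string_list : List String) (analyzed_string : String) (threshold : Int), Dom_questao06 string_list analyzed_string threshold → Spec_questao06 string_list analyzed_string threshold (questao06 string_list analyzed_string threshold)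
def Claim_changed_questao06 : Prop := Dom_questao06 (pvDiffWitness_questao06.1) (pvDiffWitness_questao06.2.1) (pvDiffWitness_questao06.2.2) ∧ D_questao06 (pvDiffWitness_questao06.1) (pvDiffWitness_questao06.2.1) (pvDiffWitness_questao06.2.2) ∧ questao06 (pvDiffWitness_questao06.1) (pvDiffWitness_questao06.2.1) (pvDiffWitness_questao06.2.2) = pvDiffWitnessOut_questao06.1 ∧ questao06_alt (pvDiffWitness_questao06.1) (pvDiffWitness_questao06.2.1) (pvDiffWitness_questao06.2.2) = pvDiffWitnessOut_questao06.2 ∧ pvDiffWitnessOut_questao06.1 ≠ pvDiffWitnessOut_questao06.2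
def Claim_exact_questao06 : Prop := ∀ (string_list : List String) (analyzed_string : String) (threshold : Int), Dom_questao06 string_list analyzed_string threshold → D_questao06 string_list analyzed_string threshold → questao06 string_list analyzed_string threshold ≠ questao06_alt string_list analyzed_string threshold

-- ===== LEMMAS AND PROOFS =====

lemma mem_qaIdxs (sl : List String) (tgt : String) (p : Int) :
    p ∈ qaIdxs sl tgt ↔ 0 ≤ p ∧ p < (sl.length : Int) ∧ PySem.List.pyGetD sl p "" = tgt := by
  unfold qaIdxs
  rw [PySem.List.foldl_append_if_eq_filter]
  simp [List.mem_filter, PySem.List.mem_pyRange_one, and_assoc]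

lemma mem_qbMatches (sl : List String) (tgt : String) (p : Int) :
    p ∈ qbMatches sl tgt ↔ 0 ≤ p ∧ p < (sl.length : Int) ∧ PySem.List.pyGetD sl p "" = tgt := by
  unfold qbMatches
  rw [PySem.List.enumerate_eq_map_pyRange sl ""]
  simp [List.mem_map, List.mem_filter, PySem.List.mem_pyRange_one, and_assoc]

lemma mem_foldl_add2 (l : List Int) (f g : Int → Int) (st : PySem.Set Int) (y : Int) :
    y ∈ l.foldl (fun st p => PySem.Set.add (PySem.Set.add st (f p)) (g p)) st ↔
      y ∈ st ∨ ∃ p ∈ l, y = f p ∨ y = g p := by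
  induction l generalizing st with
  | nil => simp
  | cons a l ih => simp [List.foldl_cons, ih, PySem.Set.mem_add, or_assoc]

lemma nodup_foldl_add2 (l : List Int) (f g : Int → Int) (st : PySem.Set Int) (h : st.Nodup) :
    (l.foldl (fun st p => PySem.Set.add (PySem.Set.add st (f p)) (g p)) st).Nodup := by
  induction l generalizing st with
  | nil => exact h
  | cons a l ih => exact ih _ (PySem.Set.nodup_add _ _ (PySem.Set.nodup_add _ _ h))

lemma mem_foldl_outer (R idxs : List Int) (n : Int) (s0 : PySem.Set Int) (y : Int) :
    y ∈ R.foldl (fun st i => idxs.foldl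
        (fun st p => PySem.Set.add (PySem.Set.add st (qaClampLo p i)) (qaClampHi n p i)) st) s0 ↔
      y ∈ s0 ∨ ∃ i ∈ R, ∃ p ∈ idxs, y = qaClampLo p i ∨ y = qaClampHi n p i := by
  induction R generalizing s0 with
  | nil => simp
  | cons a R ih =>
    simp [List.foldl_cons, ih, mem_foldl_add2, or_assoc]

lemma mem_qaSet (sl : List String) (tgt : String) (t : Int) (y : Int) :
    y ∈ qaSet sl tgt t ↔
      ∃ i, (1 ≤ i ∧ i < t + 1) ∧ ∃ p ∈ qaIdxs sl tgt,
        y = qaClampLo p i ∨ y = qaClampHi (sl.length : Int) p i := by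
  unfold qaSet
  rw [mem_foldl_outer]
  simp [PySem.Set.empty, PySem.List.mem_pyRange_one, and_assoc]

lemma nodup_foldl_outer (R idxs : List Int) (n : Int) (s0 : PySem.Set Int) (h : s0.Nodup) :
    (R.foldl (fun st i => idxs.foldl
        (fun st p => PySem.Set.add (PySem.Set.add st (qaClampLo p i)) (qaClampHi n p i)) st) s0).Nodup := by
  induction R generalizing s0 with
  | nil => exact h
  | cons a R ih => exact ih _ (nodup_foldl_add2 _ _ _ _ h)

lemma nodup_qaSet (sl : List String) (tgt : String) (t : Int) : (qaSet sl tgt t).Nodup := by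
  unfold qaSet
  exact nodup_foldl_outer _ _ _ _ (by simp [PySem.Set.empty])

-- A's membership predicate, as a boolean over an index: B's nearness test plus the
-- boundary self-inclusion produced by A's clamping
def qAnear (sl : List String) (tgt : String) (t : Int) (j : Int) : Bool :=
  qbNear t (qbMatches sl tgt) j ||
    (decide (1 ≤ t) &&
      ((j == 0 && (qbMatches sl tgt).contains 0) ||
       (j == (sl.length : Int) - 1 && (qbMatches sl tgt).contains ((sl.length : Int) - 1))))

lemma mem_qaSet_iff_anear (sl : List String) (tgt : String) (t : Int) (j : Int) :
    j ∈ qaSet sl tgt t ↔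
      (0 ≤ j ∧ j < (sl.length : Int)) ∧ qAnear sl tgt t j = true := by
  set n : Int := (sl.length : Int) with hn
  have hmem : ∀ q : Int, q ∈ qbMatches sl tgt ↔ 0 ≤ q ∧ q < n ∧ PySem.List.pyGetD sl q "" = tgt :=
    fun q => mem_qbMatches sl tgt q
  rw [mem_qaSet]
  have hA : qAnear sl tgt t j = true ↔
      (∃ q, (0 ≤ q ∧ q < n ∧ PySem.List.pyGetD sl q "" = tgt) ∧ q ≠ j ∧ |q - j| ≤ t) ∨
      (1 ≤ t ∧ ((j = 0 ∧ (0 ≤ (0:Int) ∧ (0:Int) < n ∧ PySem.List.pyGetD sl 0 "" = tgt)) ∨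
                (j = n - 1 ∧ (0 ≤ n - 1 ∧ n - 1 < n ∧ PySem.List.pyGetD sl (n-1) "" = tgt)))) := by
    unfold qAnear qbNear
    simp [List.any_eq_true, hmem, ← hn, and_assoc, and_or_left]
  rw [hA]
  constructor
  · rintro ⟨i, ⟨hi1, hi2⟩, p, hp, hcase⟩
    rw [mem_qaIdxs] at hp
    obtain ⟨hp0, hp1, hps⟩ := hp
    rw [← hn] at hp1
    rcases hcase with h | h
    · unfold qaClampLo at h
      split_ifs at h with hlt
      · -- j = 0 by clamping: p - i < 0
        subst h
        by_cases hp0' : p = 0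
        · subst hp0'
          exact ⟨⟨le_refl 0, by omega⟩, Or.inr ⟨by omega, Or.inl ⟨rfl, by omega, by omega, hps⟩⟩⟩
        · exact ⟨⟨le_refl 0, by omega⟩, Or.inl ⟨p, ⟨hp0, hp1, hps⟩, by omega, by rw [abs_le]; omega⟩⟩
      · subst h
        exact ⟨⟨by omega, by omega⟩, Or.inl ⟨p, ⟨hp0, hp1, hps⟩, by omega, by rw [abs_le]; omega⟩⟩
    · unfold qaClampHi at h
      rw [← hn] at h
      split_ifs at h with hgt
      · subst h
        by_cases hp1' : p = n - 1
        · subst hp1'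
          exact ⟨⟨by omega, by omega⟩, Or.inr ⟨by omega, Or.inr ⟨rfl, by omega, by omega, by simpa using hps⟩⟩⟩
        · exact ⟨⟨by omega, by omega⟩, Or.inl ⟨p, ⟨hp0, hp1, hps⟩, by omega, by rw [abs_le]; omega⟩⟩
      · subst h
        exact ⟨⟨by omega, by omega⟩, Or.inl ⟨p, ⟨hp0, hp1, hps⟩, by omega, by rw [abs_le]; omega⟩⟩
  · rintro ⟨⟨hj0, hj1⟩, hcase⟩
    rcases hcase with ⟨q, ⟨h0, h1, h2⟩, hne, habs⟩ | ⟨ht, hb⟩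
    · rw [abs_le] at habs
      have hq : q ∈ qaIdxs sl tgt := (mem_qaIdxs sl tgt q).mpr ⟨h0, by omega, h2⟩
      rcases lt_or_gt_of_ne hne with hlt | hgt
      · -- q < j : reach j as q + (j - q)
        refine ⟨j - q, ⟨by omega, by omega⟩, q, hq, Or.inr ?_⟩
        unfold qaClampHi
        rw [← hn]
        split_ifs with h <;> omega
      · -- j < q : reach j as q - (q - j)
        refine ⟨q - j, ⟨by omega, by omega⟩, q, hq, Or.inl ?_⟩
        unfold qaClampLo
        split_ifs with h <;> omega
    · rcases hb with ⟨hj, _, _, hs⟩ | ⟨hj, _, _, hs⟩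
      · refine ⟨1, ⟨le_refl 1, by omega⟩, 0, (mem_qaIdxs sl tgt 0).mpr ⟨by omega, by omega, hs⟩, Or.inl ?_⟩
        unfold qaClampLo
        split_ifs with h <;> omega
      · refine ⟨1, ⟨le_refl 1, by omega⟩, n - 1, (mem_qaIdxs sl tgt (n-1)).mpr ⟨by omega, by omega, hs⟩, Or.inr ?_⟩
        unfold qaClampHi
        rw [← hn]
        split_ifs with h <;> omega

-- the shared dedup step
def ddF (sl : List String) (res : List String) (j : Int) : List String :=
  if PySem.List.pyGetD sl j "" ∈ res then res else res ++ [PySem.List.pyGetD sl j ""]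

lemma ddF_subset (sl : List String) (res : List String) (j : Int) (s : String) (h : s ∈ res) :
    s ∈ ddF sl res j := by
  unfold ddF
  split_ifs with hm
  · exact h
  · exact List.mem_append_left _ h

lemma self_mem_ddF (sl : List String) (res : List String) (j : Int) :
    PySem.List.pyGetD sl j "" ∈ ddF sl res j := by
  unfold ddF
  split_ifs with hm
  · exact hm
  · simp

lemma ddF_mono (sl : List String) (l : List Int) (res : List String) (s : String) (h : s ∈ res) :
    s ∈ l.foldl (ddF sl) res := by
  induction l generalizing res with
  | nil => exact h
  | cons a l ih => exact ih _ (ddF_subset sl res a s h)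

lemma mem_foldl_ddF (sl : List String) (l : List Int) (res : List String) (j : Int) (h : j ∈ l) :
    PySem.List.pyGetD sl j "" ∈ l.foldl (ddF sl) res := by
  induction l generalizing res with
  | nil => cases h
  | cons a l ih =>
    rcases List.mem_cons.mp h with rfl | hl
    · exact ddF_mono sl l _ _ (self_mem_ddF sl res j)
    · exact ih _ hl

-- the two nearness predicates agree at j whenever the boundary clause at j is covered
lemma qAnear_eq_qbNear (sl : List String) (tgt : String) (t : Int) (j : Int)
    (h0 : 1 ≤ t → j = 0 → (0:Int) ∈ qbMatches sl tgt → qbNear t (qbMatches sl tgt) j = true)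
    (hN : 1 ≤ t → j = (sl.length : Int) - 1 → ((sl.length : Int) - 1) ∈ qbMatches sl tgt →
            qbNear t (qbMatches sl tgt) j = true) :
    qAnear sl tgt t j = qbNear t (qbMatches sl tgt) j := by
  unfold qAnear
  cases hq : qbNear t (qbMatches sl tgt) j with
  | true => simp
  | false =>
    rw [Bool.false_or]
    rw [Bool.eq_false_iff]
    simp only [ne_eq, Bool.and_eq_true, Bool.or_eq_true, beq_iff_eq, decide_eq_true_eq,
      List.contains_iff_mem, not_and, not_or]
    intro ht
    constructor
    · intro hj0 hm0
      have hh := h0 ht hj0 hm0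
      rw [hq] at hh
      exact Bool.false_ne_true hh
    · intro hjN hmN
      have hh := hN ht hjN hmN
      rw [hq] at hh
      exact Bool.false_ne_true hh

-- A's result is the dedup fold over the in-order indices passing qAnear
lemma questao06_eq_fold (sl : List String) (tgt : String) (t : Int) :
    questao06 sl tgt t =
      ((PySem.List.pyRange 0 (sl.length : Int) 1).filter (fun j => qAnear sl tgt t j)).foldl
        (ddF sl) [] := by
  unfold questao06
  have hsorted : PySem.List.sorted (qaSet sl tgt t) (fun x => x) =
      (PySem.List.pyRange 0 (sl.length : Int) 1).filter (fun j => qAnear sl tgt t j) := by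
    apply PySem.List.sorted_eq_of_perm_of_pairwise_lt
    · rw [List.perm_ext_iff_of_nodup
        ((PySem.List.nodup_pyRange_one 0 (sl.length : Int)).filter _)
        (nodup_qaSet sl tgt t)]
      intro a
      rw [List.mem_filter, PySem.List.mem_pyRange_one, mem_qaSet_iff_anear sl tgt t a]
    · exact (PySem.List.pairwise_lt_pyRange_one 0 (sl.length : Int)).filter _
  rw [hsorted]
  rfl

-- B's result is the dedup fold over the in-order indices passing qbNear
lemma questao06_alt_eq_fold (sl : List String) (tgt : String) (t : Int) :
    questao06_alt sl tgt t =
      ((PySem.List.pyRange 0 (sl.length : Int) 1).filter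
          (fun j => qbNear t (qbMatches sl tgt) j)).foldl (ddF sl) [] := by
  unfold questao06_alt
  rw [PySem.List.enumerate_eq_map_pyRange sl "", List.foldl_map]
  rw [← PySem.List.foldl_if_eq_foldl_filter (fun j => qbNear t (qbMatches sl tgt) j) (ddF sl)]
  congr 1
  funext res j
  by_cases hnear : qbNear t (qbMatches sl tgt) j = true
  · by_cases hmem : PySem.List.pyGetD sl j "" ∈ res
    · simp [hnear, hmem, ddF]
    · simp [hnear, hmem, ddF]
  · simp [hnear]

-- bridge: Int-index membership in qbMatches vs Nat indexing in D_
lemma mem_qbMatches_nat (sl : List String) (tgt : String) (k : Nat) (hk : k < sl.length) :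
    ((k : Int) ∈ qbMatches sl tgt) ↔ sl[k]? = some tgt := by
  rw [mem_qbMatches]
  have hget : PySem.List.pyGetD sl (k : Int) "" = sl.getD k "" := PySem.List.pyGetD_natCast sl k ""
  rw [hget]
  simp [List.getD_eq_getElem?_getD, List.getElem?_eq_getElem hk]
  omega

lemma mem_idxsOf (sl : List String) (tgt : String) (k : Nat) :
    k ∈ sl.idxsOf tgt ↔ k < sl.length ∧ sl[k]? = some tgt := by
  unfold List.idxsOf
  rw [List.mem_findIdxs_iff_exists_getElem_pos]
  constructor
  · rintro ⟨h, hk⟩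
    exact ⟨h, by rw [List.getElem?_eq_getElem h]; simpa using hk⟩
  · rintro ⟨h, hk⟩
    rw [List.getElem?_eq_getElem h] at hk
    exact ⟨h, by simpa using hk⟩

lemma sorted_idxsOf (sl : List String) (tgt : String) : (sl.idxsOf tgt).Pairwise (· < ·) := by
  unfold List.idxsOf
  exact List.pairwise_findIdxs

-- on a strictly increasing list, 'all pairwise gaps exceed T' gives IsChain
lemma chain'_of_gaps (T : Nat) (l : List Nat)
    (h : ∀ p ∈ l, ∀ q ∈ l, p < q → T < q - p) (hs : l.Pairwise (· < ·)) :
    l.IsChain (fun p q => T < q - p) := by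
  apply List.Pairwise.isChain
  exact (List.pairwise_iff_forall_sublist.mpr (by
    intro a b hab
    have ha : a ∈ l := hab.subset (by simp)
    have hb : b ∈ l := hab.subset (by simp)
    have hlt : a < b := List.pairwise_iff_forall_sublist.mp hs hab
    exact h a ha b hb hlt))

lemma main_eq (sl : List String) (tgt : String) (t : Int)
    (hnd : ¬ D_questao06 sl tgt t) : questao06 sl tgt t = questao06_alt sl tgt t := by
  rw [questao06_eq_fold, questao06_alt_eq_fold]
  set n : Int := (sl.length : Int) with hn
  by_cases ht : 1 ≤ t
  · by_cases hnil : sl = []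
    · subst hnil; rfl
    · have hlen : 1 ≤ sl.length := List.length_pos_iff.mpr hnil
      have hn1 : (1:Int) ≤ n := by rw [hn]; exact_mod_cast hlen
      unfold D_questao06 at hnd
      obtain ⟨hc1, hc2⟩ := not_or.mp (fun h => hnd ⟨ht, h⟩)
      -- whenever index 0 is a match, clause 1's negation makes B's test true at 0
      have h0 : (0:Int) ∈ qbMatches sl tgt → qbNear t (qbMatches sl tgt) 0 = true := by
        intro hm0
        have hs0 : sl[0]? = some tgt := (mem_qbMatches_nat sl tgt 0 (by omega)).mp (by exact_mod_cast hm0)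
        have h0M : 0 ∈ sl.idxsOf tgt := (mem_idxsOf sl tgt 0).mpr ⟨by omega, hs0⟩
        have hex := not_forall.mp (not_and.mp hc1 h0M)
        obtain ⟨k, hk⟩ := hex
        rw [Classical.not_imp] at hk
        obtain ⟨hkM, hk2⟩ := hk
        rw [Classical.not_imp] at hk2
        obtain ⟨hkt, hk0⟩ := hk2
        obtain ⟨hkl, hkeq⟩ := (mem_idxsOf sl tgt k).mp hkM
        have hkm : (k : Int) ∈ qbMatches sl tgt := (mem_qbMatches_nat sl tgt k hkl).mpr hkeq
        unfold qbNear
        rw [List.any_eq_true]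
        refine ⟨(k:Int), hkm, ?_⟩
        simp only [bne_iff_ne, Bool.and_eq_true, decide_eq_true_eq]
        have hk1 : 1 ≤ k := by omega
        exact ⟨by exact_mod_cast (by omega : ¬ (k:Int) = 0), by rw [abs_le]; omega⟩
      by_cases hb : ((n - 1) ∈ qbMatches sl tgt ∧ qbNear t (qbMatches sl tgt) (n-1) = false)
      · -- mismatch exactly at n-1; clause 2's negation yields a covered pair,
        -- so the extra boundary index adds nothing to the dedup fold
        obtain ⟨hmN, hnearN⟩ := hb
        have hcast : ((sl.length - 1 : Nat) : Int) = n - 1 := by rw [hn]; omega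
        have hsN : sl[sl.length - 1]? = some tgt := by
          apply (mem_qbMatches_nat sl tgt (sl.length - 1) (by omega)).mp
          rw [hcast]; exact hmN
        have hNM : sl.length - 1 ∈ sl.idxsOf tgt := (mem_idxsOf sl tgt _).mpr ⟨by omega, hsN⟩
        have hnoch : ¬ (sl.idxsOf tgt).IsChain (fun p q => t.toNat < q - p) :=
          fun h => not_and.mp hc2 hNM h
        have hpair : ∃ p ∈ sl.idxsOf tgt, ∃ q ∈ sl.idxsOf tgt, p < q ∧ q - p ≤ t.toNat := by
          by_contra hno
          push_neg at hno
          exact hnoch (chain'_of_gaps t.toNat _ (fun p hp q hq hlt => hno p hp q hq hlt)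
            (sorted_idxsOf sl tgt))
        obtain ⟨p, hpM, q, hqM, hpltq, hqt⟩ := hpair
        obtain ⟨hpl, hpt⟩ := (mem_idxsOf sl tgt p).mp hpM
        obtain ⟨hql, hqt'⟩ := (mem_idxsOf sl tgt q).mp hqM
        have hpm : (p : Int) ∈ qbMatches sl tgt := (mem_qbMatches_nat sl tgt p hpl).mpr hpt
        have hqm : (q : Int) ∈ qbMatches sl tgt := (mem_qbMatches_nat sl tgt q hql).mpr hqt'
        have hBp : qbNear t (qbMatches sl tgt) (p:Int) = true := by
          unfold qbNear
          rw [List.any_eq_true]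
          refine ⟨(q:Int), hqm, ?_⟩
          simp only [bne_iff_ne, Bool.and_eq_true, decide_eq_true_eq]
          exact ⟨by exact_mod_cast (by omega : ¬ (q:Int) = (p:Int)),
                 by rw [abs_le]; omega⟩
        have hsingle : PySem.List.pyRange (n-1) n 1 = [n-1] := by
          have h1 : (n-1) + 1 = n := by omega
          have h2 := PySem.List.pyRange_one_singleton (n-1)
          rwa [h1] at h2
        have hsplit : PySem.List.pyRange 0 n 1 =
            PySem.List.pyRange 0 (n-1) 1 ++ [n-1] := by
          rw [PySem.List.pyRange_one_append 0 (n-1) n (by omega) (by omega), hsingle]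
        have hagree : ∀ j ∈ PySem.List.pyRange 0 (n-1) 1,
            qAnear sl tgt t j = qbNear t (qbMatches sl tgt) j := by
          intro j hj
          rw [PySem.List.mem_pyRange_one] at hj
          apply qAnear_eq_qbNear
          · intro _ hj0 hm0; rw [hj0]; exact h0 hm0
          · intro _ hjN _; exact absurd hjN (by rw [← hn]; omega)
        have hAN : qAnear sl tgt t (n-1) = true := by
          unfold qAnear
          simp only [Bool.or_eq_true, Bool.and_eq_true, Bool.or_eq_true, beq_iff_eq,
            decide_eq_true_eq, List.contains_iff_mem]
          refine Or.inr ⟨ht, Or.inr ⟨?_, ?_⟩⟩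
          · rw [← hn]
          · rw [← hn]; exact hmN
        rw [hsplit, List.filter_append, List.filter_append]
        rw [List.filter_congr hagree]
        have hfA : List.filter (fun j => qAnear sl tgt t j) [n-1] = [n-1] := by
          simp [List.filter, hAN]
        have hfB : List.filter (fun j => qbNear t (qbMatches sl tgt) j) [n-1] = [] := by
          simp [List.filter, hnearN]
        rw [hfA, hfB, List.append_nil, List.foldl_append]
        simp only [List.foldl_cons, List.foldl_nil]
        -- the final ddF step is a no-op: tgt is already in the accumulated result
        have htgt : PySem.List.pyGetD sl (n-1) "" = tgt := by
          have hh := (mem_qbMatches sl tgt (n-1)).mp hmN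
          rw [← hn] at hh
          exact hh.2.2
        have hpmem : (p:Int) ∈ (PySem.List.pyRange 0 (n-1) 1).filter
            (fun j => qbNear t (qbMatches sl tgt) j) := by
          rw [List.mem_filter, PySem.List.mem_pyRange_one]
          refine ⟨⟨by omega, ?_⟩, hBp⟩
          rw [hn]; omega
        have hpv : PySem.List.pyGetD sl (p:Int) "" = tgt := ((mem_qbMatches sl tgt (p:Int)).mp hpm).2.2
        have hin := mem_foldl_ddF sl _ [] (p:Int) hpmem
        rw [hpv] at hin
        unfold ddF
        rw [htgt]
        exact if_pos hin
      · -- no mismatch anywhere: the predicates agree on the whole range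
        apply congrArg (fun l => List.foldl (ddF sl) [] l)
        apply List.filter_congr
        intro j hj
        rw [PySem.List.mem_pyRange_one] at hj
        apply qAnear_eq_qbNear
        · intro _ hj0 hm0; rw [hj0]; exact h0 hm0
        · intro _ hjN hmN
          rcases not_and_or.mp hb with h | h
          · exact absurd hmN h
          · cases hq : qbNear t (qbMatches sl tgt) (n - 1) with
            | false => exact absurd hq h
            | true => rw [hjN]; exact hq
  · -- t < 1 : both predicates are false everywhere
    have hBfalse : ∀ j, qbNear t (qbMatches sl tgt) j = false := by
      intro j
      unfold qbNear
      rw [List.any_eq_false]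
      intro q _
      simp only [bne_iff_ne, Bool.and_eq_true, decide_eq_true_eq, not_and]
      intro hne habs
      rw [abs_le] at habs
      omega
    have hAfalse : ∀ j, qAnear sl tgt t j = false := by
      intro j
      unfold qAnear
      rw [hBfalse j, Bool.false_or]
      simp [ht]
    have hA : List.filter (fun j => qAnear sl tgt t j) (PySem.List.pyRange 0 n 1) = [] := by
      rw [List.filter_eq_nil_iff]
      intro j _
      simp [hAfalse j]
    have hB : List.filter (fun j => qbNear t (qbMatches sl tgt) j) (PySem.List.pyRange 0 n 1) = [] := by
      rw [List.filter_eq_nil_iff]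
      intro j _
      simp [hBfalse j]
    rw [hA, hB]

lemma mem_idxsOf_pyGetD (sl : List String) (tgt : String) (k : Nat) :
    k ∈ sl.idxsOf tgt ↔ k < sl.length ∧ PySem.List.pyGetD sl (k : Int) "" = tgt := by
  rw [mem_idxsOf]
  have hg : k < sl.length → PySem.List.pyGetD sl (k : Int) "" = sl.getD k "" :=
    fun _ => PySem.List.pyGetD_natCast sl k ""
  constructor
  · rintro ⟨h, hk⟩
    refine ⟨h, ?_⟩
    rw [hg h, List.getD_eq_getElem?_getD, hk]
    rfl
  · rintro ⟨h, hk⟩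
    refine ⟨h, ?_⟩
    rw [hg h, List.getD_eq_getElem?_getD, List.getElem?_eq_getElem h] at hk
    rw [List.getElem?_eq_getElem h]
    exact congrArg some hk

lemma qbMatches_mem_toNat (sl : List String) (tgt : String) (q : Int) (h : q ∈ qbMatches sl tgt) :
    0 ≤ q ∧ q < (sl.length : Int) ∧ q.toNat ∈ sl.idxsOf tgt := by
  obtain ⟨h0, h1, h2⟩ := (mem_qbMatches sl tgt q).mp h
  refine ⟨h0, h1, (mem_idxsOf_pyGetD sl tgt q.toNat).mpr ⟨by omega, ?_⟩⟩
  have hc : ((q.toNat : Nat) : Int) = q := by omega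
  rw [hc]
  exact h2

lemma head?_ddF (sl : List String) (res : List String) (j : Int) (h : res ≠ []) :
    (ddF sl res j).head? = res.head? ∧ ddF sl res j ≠ [] := by
  unfold ddF
  split_ifs with hm
  · exact ⟨rfl, h⟩
  · cases res with
    | nil => simp at h
    | cons a r => simp

lemma head?_foldl_ddF (sl : List String) (l : List Int) (res : List String) (h : res ≠ []) :
    (l.foldl (ddF sl) res).head? = res.head? := by
  induction l generalizing res with
  | nil => rfl
  | cons a l ih =>
    obtain ⟨h1, h2⟩ := head?_ddF sl res a h
    rw [List.foldl_cons, ih _ h2, h1]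

lemma head_foldl_cons (sl : List String) (j : Int) (l : List Int) :
    ((j :: l).foldl (ddF sl) []).head? = some (PySem.List.pyGetD sl j "") := by
  rw [List.foldl_cons]
  have hstep : ddF sl [] j = [PySem.List.pyGetD sl j ""] := by unfold ddF; simp
  rw [hstep, head?_foldl_ddF sl l _ (by simp)]
  rfl

lemma foldl_ddF_subset (sl : List String) (l : List Int) (res : List String) (x : String)
    (h : x ∈ l.foldl (ddF sl) res) : x ∈ res ∨ ∃ j ∈ l, x = PySem.List.pyGetD sl j "" := by
  induction l generalizing res with
  | nil => exact Or.inl h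
  | cons a l ih =>
    rcases ih _ h with h' | ⟨j, hj, hx⟩
    · unfold ddF at h'
      split_ifs at h' with hm
      · exact Or.inl h'
      · rcases List.mem_append.mp h' with h'' | h''
        · exact Or.inl h''
        · exact Or.inr ⟨a, List.mem_cons_self, by simpa using h''⟩
    · exact Or.inr ⟨j, List.mem_cons_of_mem _ hj, hx⟩

lemma pairwise_pair {R : Nat → Nat → Prop} (l : List Nat) (hR : l.Pairwise R)
    (hs : l.Pairwise (· < ·)) : ∀ p ∈ l, ∀ q ∈ l, p < q → R p q := by
  induction l with
  | nil => simp
  | cons a l ih =>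
    rw [List.pairwise_cons] at hR hs
    intro p hp q hq hlt
    rcases List.mem_cons.mp hp with rfl | hp' <;> rcases List.mem_cons.mp hq with rfl | hq'
    · omega
    · exact hR.1 q hq'
    · exact absurd (hs.1 p hp') (by omega)
    · exact ih hR.2 hs.2 p hp' q hq' hlt

lemma gaps_of_chain (T : Nat) (l : List Nat) (hs : l.Pairwise (· < ·))
    (hc : l.IsChain (fun p q => T < q - p)) :
    ∀ p ∈ l, ∀ q ∈ l, p < q → T < q - p := by
  have hp : l.Pairwise (fun p q => T < q - p) :=
    (@List.isChain_iff_pairwise Nat (fun p q => T < q - p) l ⟨fun h1 h2 => by omega⟩).mp hc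
  exact pairwise_pair l hp hs

lemma tight_main (sl : List String) (tgt : String) (t : Int) (hd : D_questao06 sl tgt t) :
    questao06 sl tgt t ≠ questao06_alt sl tgt t := by
  obtain ⟨ht, hcase⟩ := hd
  rw [questao06_eq_fold, questao06_alt_eq_fold]
  rcases hcase with ⟨h0M, hno⟩ | ⟨hNM, hch⟩
  · -- the match at index 0 is its own neighbour for A, but B's list starts later (or is empty)
    have hlen : 0 < sl.length := ((mem_idxsOf sl tgt 0).mp h0M).1
    have htgt0 : PySem.List.pyGetD sl 0 "" = tgt := by
      have := ((mem_idxsOf_pyGetD sl tgt 0).mp h0M).2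
      simpa using this
    have hm0 : (0:Int) ∈ qbMatches sl tgt :=
      (mem_qbMatches sl tgt 0).mpr ⟨le_refl 0, by exact_mod_cast hlen, htgt0⟩
    have hA0 : qAnear sl tgt t 0 = true := by
      unfold qAnear
      simp only [Bool.or_eq_true, Bool.and_eq_true, beq_iff_eq, decide_eq_true_eq,
        List.contains_iff_mem]
      exact Or.inr ⟨ht, Or.inl ⟨by trivial, hm0⟩⟩
    have hB0 : qbNear t (qbMatches sl tgt) 0 = false := by
      unfold qbNear
      rw [List.any_eq_false]
      intro q hq
      simp only [bne_iff_ne, Bool.and_eq_true, decide_eq_true_eq, not_and]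
      intro hne habs
      rw [abs_le] at habs
      obtain ⟨hq0, hq1, hqM⟩ := qbMatches_mem_toNat sl tgt q hq
      have hk := hno q.toNat hqM (by omega)
      omega
    have hcons : PySem.List.pyRange 0 (sl.length:Int) 1 =
        0 :: PySem.List.pyRange 1 (sl.length:Int) 1 :=
      PySem.List.pyRange_one_cons (by exact_mod_cast hlen)
    rw [hcons, List.filter_cons, List.filter_cons]
    simp only [hA0, hB0, if_true, Bool.false_eq_true, if_false]
    by_cases h2 : 1 < sl.length
    · have hB1 : qbNear t (qbMatches sl tgt) 1 = true := by
        unfold qbNear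
        rw [List.any_eq_true]
        refine ⟨0, hm0, ?_⟩
        simp only [bne_iff_ne, Bool.and_eq_true, decide_eq_true_eq]
        exact ⟨by norm_num, by rw [abs_le]; omega⟩
      have hs1 : PySem.List.pyGetD sl 1 "" ≠ tgt := by
        intro he
        have h1M : (1:Nat) ∈ sl.idxsOf tgt :=
          (mem_idxsOf_pyGetD sl tgt 1).mpr ⟨h2, by exact_mod_cast he⟩
        have := hno 1 h1M (by omega)
        omega
      have hcons2 : PySem.List.pyRange 1 (sl.length:Int) 1 =
          1 :: PySem.List.pyRange 2 (sl.length:Int) 1 :=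
        PySem.List.pyRange_one_cons (by exact_mod_cast h2)
      have hBlist : List.filter (fun j => qbNear t (qbMatches sl tgt) j)
          (PySem.List.pyRange 1 (sl.length:Int) 1) =
          1 :: List.filter (fun j => qbNear t (qbMatches sl tgt) j)
            (PySem.List.pyRange 2 (sl.length:Int) 1) := by
        rw [hcons2, List.filter_cons, if_pos hB1]
      rw [hBlist]
      intro heq
      have hh := congrArg List.head? heq
      rw [head_foldl_cons, head_foldl_cons, htgt0] at hh
      exact hs1 (Option.some.inj hh).symm
    · have hnil2 : PySem.List.pyRange 1 (sl.length:Int) 1 = [] :=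
        PySem.List.pyRange_one_eq_nil (by omega)
      rw [hnil2]
      simp only [List.filter_nil, List.foldl_nil]
      intro heq
      have hh := congrArg List.head? heq
      rw [head_foldl_cons] at hh
      simp at hh
  · -- the match at the last index is its own neighbour for A; no occurrence is
    -- within threshold of another, so B's result never contains the analyzed string
    have hlenN : sl.length - 1 < sl.length := ((mem_idxsOf sl tgt _).mp hNM).1
    have hlen : 0 < sl.length := by omega
    have hcastN : ((sl.length - 1 : Nat) : Int) = (sl.length : Int) - 1 := by omega
    have htgtN : PySem.List.pyGetD sl ((sl.length:Int) - 1) "" = tgt := by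
      have := ((mem_idxsOf_pyGetD sl tgt (sl.length - 1)).mp hNM).2
      rwa [hcastN] at this
    have hmN : ((sl.length:Int) - 1) ∈ qbMatches sl tgt :=
      (mem_qbMatches sl tgt _).mpr ⟨by omega, by omega, htgtN⟩
    have hAN : qAnear sl tgt t ((sl.length:Int) - 1) = true := by
      unfold qAnear
      simp only [Bool.or_eq_true, Bool.and_eq_true, beq_iff_eq, decide_eq_true_eq,
        List.contains_iff_mem]
      exact Or.inr ⟨ht, Or.inr ⟨by trivial, hmN⟩⟩
    have hNinA : ((sl.length:Int) - 1) ∈ (PySem.List.pyRange 0 (sl.length:Int) 1).filter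
        (fun j => qAnear sl tgt t j) := by
      rw [List.mem_filter, PySem.List.mem_pyRange_one]
      exact ⟨⟨by omega, by omega⟩, hAN⟩
    have htgtA : tgt ∈ (((PySem.List.pyRange 0 (sl.length:Int) 1).filter
        (fun j => qAnear sl tgt t j)).foldl (ddF sl) []) := by
      have := mem_foldl_ddF sl _ [] _ hNinA
      rwa [htgtN] at this
    have hgaps := gaps_of_chain t.toNat _ (sorted_idxsOf sl tgt) hch
    intro heq
    rw [heq] at htgtA
    rcases foldl_ddF_subset sl _ [] tgt htgtA with h | ⟨j, hj, hx⟩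
    · simp at h
    · obtain ⟨hjr, hjB⟩ := List.mem_filter.mp hj
      rw [PySem.List.mem_pyRange_one] at hjr
      have hjM : j.toNat ∈ sl.idxsOf tgt := by
        apply (mem_idxsOf_pyGetD sl tgt j.toNat).mpr
        have hc : ((j.toNat : Nat) : Int) = j := by omega
        rw [hc]
        exact ⟨by omega, hx.symm⟩
      unfold qbNear at hjB
      rw [List.any_eq_true] at hjB
      obtain ⟨q, hq, hcond⟩ := hjB
      simp only [bne_iff_ne, Bool.and_eq_true, decide_eq_true_eq] at hcond
      obtain ⟨hne, habs⟩ := hcond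
      rw [abs_le] at habs
      obtain ⟨hq0, hq1, hqM⟩ := qbMatches_mem_toNat sl tgt q hq
      rcases lt_or_gt_of_ne hne with hlt | hgt
      · have := hgaps q.toNat hqM j.toNat hjM (by omega)
        omega
      · have := hgaps j.toNat hjM q.toNat hqM (by omega)
        omega

-- ===== VERDICT (by name: the statements are the Claim_ definitions above) =====
theorem questao06_spec : Claim_unchanged_questao06 := by
  intro sl tgt t _
  unfold Spec_questao06
  intro hnd
  exact main_eq sl tgt t hnd

theorem questao06_changed : Claim_changed_questao06 := by
  unfold Claim_changed_questao06; decide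

theorem questao06_tight : Claim_exact_questao06 := by
  intro sl tgt t _ hd
  exact tight_main sl tgt t hd
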